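-- pv_equiv track=rewrite | github.com/cal-itp/data-analyses | gtfs_funnel/download_vehicle_positions.py | determine_batches
-- ===== SOURCE A (Python) =====
-- def determine_batches(rt_names: list) -> dict:
--     #https://stackoverflow.com/questions/4843158/how-to-check-if-a-string-is-a-substring-of-items-in-a-list-of-strings
--     la_metro_names = [
--         "LA Metro Bus",
--         "LA Metro Rail",
--     ]
--
--     bay_area_large_names = [
--         "AC Transit",
--         "Muni"
--     ]
--
--     bay_area_names = [
--         "Bay Area 511"
--     ]
--
--     # If any of the large operator name substring is
--     # found in our list of names, grab those
--     # be flexible bc "Vehicle Positions" and "VehiclePositions" present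
--     matching1 = [i for i in rt_names
--                 if any(name in i for name in la_metro_names)]
--
--     matching2 = [i for i in rt_names
--                 if any(name in i for name in bay_area_large_names)]
--
--     remaining_bay_area = [i for i in rt_names
--                           if any(name in i for name in bay_area_names) and
--                           (i not in matching1) and (i not in matching2)
--                          ]
--     remaining = [i for i in rt_names if
--                  (i not in matching1) and (i not in matching2) and
--                  (i not in remaining_bay_area)]
--
--     # Batch large operators together and run remaining in 2nd query
--     batch_dict = {}
--
--     batch_dict[0] = matching1
--     batch_dict[1] = remaining_bay_area
--     batch_dict[2] = remaining
--     batch_dict[3] = matching2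
--
--     return batch_dict
-- ===== SOURCE B (Python) =====
-- def determine_batches(rt_names: list) -> dict:
--     # Single pass over rt_names with four accumulators instead of four list
--     # comprehensions with repeated membership scans.
--     la_metro_names = ["LA Metro Bus", "LA Metro Rail"]
--     bay_area_large_names = ["AC Transit", "Muni"]
--     bay_area_names = ["Bay Area 511"]
--
--     matching1, remaining_bay_area, remaining, matching2 = [], [], [], []
--     for i in rt_names:
--         m1 = any(name in i for name in la_metro_names)
--         m2 = any(name in i for name in bay_area_large_names)
--         if m1:
--             matching1.append(i)
--         if m2:
--             matching2.append(i)
--         if not m1 and not m2: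
--             if any(name in i for name in bay_area_names):
--                 remaining_bay_area.append(i)
--             else:
--                 remaining.append(i)
--
--     return {0: matching1, 1: remaining_bay_area, 2: remaining, 3: matching2}
-- ===== Notes on version B (the rewrite author's own statement) =====
-- stated objective: alternative
-- what changed: Replaces four separate list comprehensions with 'i not in matching' membership scans by a single pass over rt_names keeping four accumulators and boolean match flags.
import Mathlib
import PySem

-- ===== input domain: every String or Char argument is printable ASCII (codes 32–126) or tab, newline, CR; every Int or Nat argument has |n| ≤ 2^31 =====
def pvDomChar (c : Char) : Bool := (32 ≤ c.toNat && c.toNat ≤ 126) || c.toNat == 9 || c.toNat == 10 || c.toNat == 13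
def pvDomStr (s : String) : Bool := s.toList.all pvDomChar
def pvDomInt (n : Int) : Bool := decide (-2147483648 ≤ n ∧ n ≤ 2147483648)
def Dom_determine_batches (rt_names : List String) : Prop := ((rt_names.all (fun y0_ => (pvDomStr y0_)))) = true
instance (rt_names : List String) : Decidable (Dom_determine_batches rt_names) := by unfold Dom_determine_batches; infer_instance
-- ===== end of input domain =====

-- ===== PORT A =====
-- B makes a single pass with four accumulators and match flags instead of A's four
-- comprehensions with membership scans (objective: alternative decomposition, same cost).
def pvLaMetro : List String := ["LA Metro Bus", "LA Metro Rail"]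
def pvBayLarge : List String := ["AC Transit", "Muni"]
def pvBay : List String := ["Bay Area 511"]

def determine_batches (rt_names : List String) : List (Int × List String) :=
  let matching1 := rt_names.filter (fun i => pvLaMetro.any (fun name => PySem.Str.isIn name i))
  let matching2 := rt_names.filter (fun i => pvBayLarge.any (fun name => PySem.Str.isIn name i))
  let remaining_bay_area := rt_names.filter (fun i =>
    pvBay.any (fun name => PySem.Str.isIn name i) && !(matching1.contains i) && !(matching2.contains i))
  let remaining := rt_names.filter (fun i =>
    !(matching1.contains i) && !(matching2.contains i) && !(remaining_bay_area.contains i))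
  let batch_dict : PySem.Dict Int (List String) := PySem.Dict.empty
  let batch_dict := batch_dict.insert 0 matching1
  let batch_dict := batch_dict.insert 1 remaining_bay_area
  let batch_dict := batch_dict.insert 2 remaining
  (batch_dict.insert 3 matching2).items

-- ===== PORT B =====
def pvStep (st : List String × List String × List String × List String) (i : String) :
    List String × List String × List String × List String :=
  let m1 := pvLaMetro.any (fun name => PySem.Str.isIn name i)
  let m2 := pvBayLarge.any (fun name => PySem.Str.isIn name i)
  let st := if m1 then (st.1 ++ [i], st.2.1, st.2.2.1, st.2.2.2) else st
  let st := if m2 then (st.1, st.2.1, st.2.2.1, st.2.2.2 ++ [i]) else st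
  if !m1 && !m2 then
    if pvBay.any (fun name => PySem.Str.isIn name i) then
      (st.1, st.2.1 ++ [i], st.2.2.1, st.2.2.2)
    else
      (st.1, st.2.1, st.2.2.1 ++ [i], st.2.2.2)
  else st

def determine_batches_alt (rt_names : List String) : List (Int × List String) :=
  let st := rt_names.foldl pvStep ([], [], [], [])
  [(0, st.1), (1, st.2.1), (2, st.2.2.1), (3, st.2.2.2)]

-- ===== PRECONDITION & SPEC =====
def Spec_determine_batches (rt_names : List String) (out : List (Int × List String)) : Prop := out = determine_batches_alt rt_names
instance (rt_names : List String) (out : List (Int × List String)) : Decidable (Spec_determine_batches rt_names out) := by unfold Spec_determine_batches; infer_instance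

-- ===== CLAIM (what is proved, stated in full; the proofs are below) =====
def Claim_equal_determine_batches : Prop := ∀ (rt_names : List String), Dom_determine_batches rt_names → Spec_determine_batches rt_names (determine_batches rt_names)

-- ===== LEMMAS AND PROOFS =====

-- The three match predicates (proof-side abbreviations for the tests both ports perform).
def pvP1 (i : String) : Bool := pvLaMetro.any (fun name => PySem.Str.isIn name i)
def pvP2 (i : String) : Bool := pvBayLarge.any (fun name => PySem.Str.isIn name i)
def pvPB (i : String) : Bool := pvBay.any (fun name => PySem.Str.isIn name i)

-- Membership in A's filtered list, tested from an element of the base list, is just the predicate.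
theorem pv_contains_filter (rt : List String) (q : String → Bool) (i : String) (h : i ∈ rt) :
    (rt.filter q).contains i = q i := by
  cases hq : q i <;> simp [List.mem_filter, hq, h]

-- Loop invariant of B's single pass: the four accumulators extend by the four filters.
theorem pv_foldl_step (xs : List String) (a b c d : List String) :
    xs.foldl pvStep (a, b, c, d) =
      (a ++ xs.filter pvP1,
       b ++ xs.filter (fun i => !pvP1 i && !pvP2 i && pvPB i),
       c ++ xs.filter (fun i => !pvP1 i && !pvP2 i && !pvPB i),
       d ++ xs.filter pvP2) := by
  induction xs generalizing a b c d with
  | nil => simp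
  | cons x xs ih =>
    simp only [List.foldl_cons, List.filter_cons]
    cases h1 : pvP1 x <;> cases h2 : pvP2 x <;> cases hb : pvPB x <;>
      simp only [h1, h2, hb, Bool.not_true, Bool.not_false, Bool.and_false, Bool.and_true,
        if_true, if_false] <;>
      simp only [pvP1, pvP2, pvPB] at h1 h2 hb <;>
      simp only [pvStep, h1, h2, hb, Bool.not_true, Bool.not_false, Bool.false_and, Bool.true_and,
        Bool.and_false, Bool.and_true, Bool.false_eq_true, if_true, if_false, ite_true] <;>
      simp [ih]

-- ===== VERDICT (by name: the statement is the Claim_ definition above) =====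
theorem determine_batches_spec : Claim_equal_determine_batches := by
  intro rt _
  unfold Spec_determine_batches determine_batches determine_batches_alt
  -- A's remaining_bay_area equals the pure-predicate filter
  have hrba : rt.filter (fun i =>
        pvBay.any (fun name => PySem.Str.isIn name i) &&
        !((rt.filter (fun i => pvLaMetro.any (fun name => PySem.Str.isIn name i))).contains i) &&
        !((rt.filter (fun i => pvBayLarge.any (fun name => PySem.Str.isIn name i))).contains i)) =
      rt.filter (fun i => !pvP1 i && !pvP2 i && pvPB i) := by
    refine List.filter_congr (fun i hi => ?_)
    rw [pv_contains_filter _ _ _ hi, pv_contains_filter _ _ _ hi]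
    show (pvPB i && !pvP1 i && !pvP2 i) = _
    cases pvP1 i <;> cases pvP2 i <;> cases pvPB i <;> rfl
  simp only [hrba]
  have hrem : rt.filter (fun i =>
        !((rt.filter (fun i => pvLaMetro.any (fun name => PySem.Str.isIn name i))).contains i) &&
        !((rt.filter (fun i => pvBayLarge.any (fun name => PySem.Str.isIn name i))).contains i) &&
        !((rt.filter (fun i => !pvP1 i && !pvP2 i && pvPB i)).contains i)) =
      rt.filter (fun i => !pvP1 i && !pvP2 i && !pvPB i) := by
    refine List.filter_congr (fun i hi => ?_)
    rw [pv_contains_filter _ _ _ hi, pv_contains_filter _ _ _ hi, pv_contains_filter _ _ _ hi]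
    show (!pvP1 i && !pvP2 i && !(!pvP1 i && !pvP2 i && pvPB i)) = _
    cases pvP1 i <;> cases pvP2 i <;> cases pvPB i <;> rfl
  simp only [hrem]
  rw [pv_foldl_step]
  simp [PySem.Dict.insert, PySem.Dict.empty, PySem.Dict.contains, pvP1, pvP2, pvPB]
  constructor <;> exact List.filter_congr (fun i _ => by simp [pvP1, pvP2])
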